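-- pv_equiv track=rewrite | github.com/PrinceSinghhub/GFG-Questions | 3 Divisors.py | threeDivisors
-- ===== SOURCE A (Python) =====
-- import math
--
-- def threeDivisors(query, q):
--     # code here
--     n = math.floor(math.sqrt(max(query)))
--     prime = [True] * (n + 1)
--     prime[0] = prime[1] = False
--     for i in range(2, n + 1):
--         if prime[i]:
--             for j in range(i * i, n + 1, i):
--                 prime[j] = False
--     dp = [0] * (n + 1)
--     for i in range(2, n + 1):
--         dp[i] = dp[i - 1]
--         if prime[i]:
--             dp[i] += 1
--     ans = []
--     for i in query:
--         val = math.floor(math.sqrt(i))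
--         ans.append(dp[val])
--     return ans
-- ===== SOURCE B (Python) =====
-- import math
--
-- def threeDivisors(query, q):
--     # Per-query trial division: no sieve and no precomputed table at all.
--     def is_prime(p):
--         return all(p % d != 0 for d in range(2, math.isqrt(p) + 1))
--
--     def count_primes_upto(v):
--         c = 0
--         for p in range(2, v + 1):
--             if is_prime(p):
--                 c += 1
--         return c
--
--     return [count_primes_upto(math.isqrt(i)) for i in query]
-- ===== Notes on version B (the rewrite author's own statement) =====
-- stated objective: alternative
-- what changed: Drops A's global sieve-of-Eratosthenes and prefix-sum table entirely: B answers each query directly by counting p in 2..isqrt(i) that pass a trial-division primality test, so there is no precompute phase and no shared state across queries.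
import Mathlib
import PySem

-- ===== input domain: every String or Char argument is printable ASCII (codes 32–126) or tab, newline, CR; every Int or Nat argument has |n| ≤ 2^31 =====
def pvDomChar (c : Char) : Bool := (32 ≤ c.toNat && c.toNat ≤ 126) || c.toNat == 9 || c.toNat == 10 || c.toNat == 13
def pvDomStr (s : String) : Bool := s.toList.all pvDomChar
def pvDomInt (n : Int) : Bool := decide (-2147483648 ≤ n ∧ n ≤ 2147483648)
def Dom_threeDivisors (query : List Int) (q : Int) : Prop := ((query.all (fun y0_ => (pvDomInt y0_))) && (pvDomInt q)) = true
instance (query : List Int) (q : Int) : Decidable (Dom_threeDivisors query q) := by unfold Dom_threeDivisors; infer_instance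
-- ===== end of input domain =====

-- B drops A's sieve-of-Eratosthenes + prefix-sum table and instead answers each query by
-- counting p in 2..isqrt(i) with a per-number trial-division primality test;
-- objective: alternative algorithm (no precompute phase; not claimed faster).

-- ===== PORT A =====
-- Python's in-place list updates are ported as Array updates (hand-ported, exact here:
-- every written index 0,1,i,j is nonnegative, and a write past the end cannot occur for
-- inputs admitted by Pre_, which guarantees max(query) ≥ 1 so `prime[1] = False` is in range).
def threeDivisors (query : List Int) (q : Int) : List Int :=
  match PySem.List.max? query (fun x => x) with
  | none => []  -- max(query) raises ValueError on []; excluded by Pre_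
  | some mx =>
    -- math.floor(math.sqrt(mx)) = Int.sqrt mx: exact for the admitted 0 ≤ mx ≤ 2^31
    let n := Int.sqrt mx
    let prime0 := ((Array.replicate (n.toNat + 1) true).setIfInBounds 0 false).setIfInBounds 1 false
    let prime := (PySem.List.pyRange 2 (n + 1) 1).foldl
      (fun pr i =>
        if pr.getD i.toNat false then
          (PySem.List.pyRange (i * i) (n + 1) i).foldl
            (fun pr2 j => pr2.setIfInBounds j.toNat false) pr
        else pr) prime0
    let dp := (PySem.List.pyRange 2 (n + 1) 1).foldl
      (fun d i =>
        let d1 := d.setIfInBounds i.toNat (d.getD (i - 1).toNat 0)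
        if prime.getD i.toNat false then
          d1.setIfInBounds i.toNat (d1.getD i.toNat 0 + 1)
        else d1)
      (Array.replicate (n.toNat + 1) (0 : Int))
    query.foldl (fun ans i => ans ++ [dp.getD (Int.sqrt i).toNat 0]) []

-- ===== PORT B =====
-- Source B's is_prime: all(p % d != 0 for d in range(2, isqrt(p) + 1))
def pvIsPrime (p : Int) : Bool :=
  (PySem.List.pyRange 2 (Int.sqrt p + 1) 1).all (fun d => decide (PySem.Int.mod p d ≠ 0))

-- Source B's count_primes_upto: an accumulator loop over range(2, v + 1)
def pvCountPrimesUpto (v : Int) : Int :=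
  (PySem.List.pyRange 2 (v + 1) 1).foldl (fun c p => if pvIsPrime p then c + 1 else c) 0

def threeDivisors_alt (query : List Int) (q : Int) : List Int :=
  query.map (fun i => pvCountPrimesUpto (Int.sqrt i))

-- ===== PRECONDITION & SPEC =====
-- Pre_ excludes exactly the inputs where A raises: empty query (ValueError from max),
-- a negative element (math.sqrt ValueError), and max(query) = 0 (IndexError at prime[1]).
def Pre_threeDivisors (query : List Int) (q : Int) : Prop :=
  query ≠ [] ∧ (∀ x ∈ query, 0 ≤ x) ∧ (∃ x ∈ query, 1 ≤ x)
instance (query : List Int) (q : Int) : Decidable (Pre_threeDivisors query q) := by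
  unfold Pre_threeDivisors; infer_instance

def pvWitness_threeDivisors : List Int × Int := ([4, 0, 17], 3)

def Spec_threeDivisors (query : List Int) (q : Int) (out : List Int) : Prop := out = threeDivisors_alt query q
instance (query : List Int) (q : Int) (out : List Int) : Decidable (Spec_threeDivisors query q out) := by unfold Spec_threeDivisors; infer_instance

-- ===== CLAIM (what is proved, stated in full; the proofs are below) =====
def Claim_equal_threeDivisors : Prop := ∀ (query : List Int) (q : Int), Dom_threeDivisors query q → Pre_threeDivisors query q → Spec_threeDivisors query q (threeDivisors query q)

-- ===== LEMMAS AND PROOFS =====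

/-- `Int.sqrt` is monotone. -/
theorem pv_sqrt_mono {a b : Int} (h : a ≤ b) : Int.sqrt a ≤ Int.sqrt b := by
  simp only [Int.sqrt]
  exact_mod_cast Nat.sqrt_le_sqrt (Int.toNat_le_toNat h)

theorem pv_arr_getD {α : Type} (a : Array α) (i : Nat) (d : α) : a.getD i d = a.toList.getD i d := by
  simp only [Array.getD, List.getD_eq_getElem?_getD, Array.getElem?_toList]
  split
  · simp [*]
  · next h => simp [Array.getElem?_eq_none (Nat.le_of_not_lt h)]

-- ---------- the value both programs compute per query ----------

/-- number of `P`-elements among 2..v -/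
def pvCount (P : Int → Bool) (v : Int) : Nat := ((PySem.List.pyRange 2 (v + 1)).filter P).length

theorem pvCount_of_lt_two (P : Int → Bool) {v : Int} (h : v < 2) : pvCount P v = 0 := by
  simp [pvCount, PySem.List.pyRange_one_eq_nil (by omega : v + 1 ≤ 2)]

theorem pvCount_succ (P : Int → Bool) {k : Int} (h : 2 ≤ k) :
    pvCount P k = pvCount P (k - 1) + (if P k then 1 else 0) := by
  have h1 : (k - 1) + 1 = k := by ring
  have h2 : PySem.List.pyRange 2 (k + 1) = PySem.List.pyRange 2 k ++ [k] :=
    PySem.List.pyRange_one_succ_right (by omega)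
  simp only [pvCount, h1, h2, List.filter_append, List.length_append, List.filter]
  cases hP : P k <;> simp

-- ---------- A's dp loop ----------

/-- the body of A's dp loop on the underlying list, with the prime-table lookup
    abstracted as `P` -/
def pvStep (P : Int → Bool) (d : List Int) (i : Int) : List Int :=
  let d1 := d.set i.toNat (d.getD (i - 1).toNat 0)
  if P i then d1.set i.toNat (d1.getD i.toNat 0 + 1) else d1

theorem pvStep_eq (P : Int → Bool) (d : List Int) {i : Int} (h2 : 2 ≤ i)
    (hlen : i.toNat < d.length) :
    pvStep P d i = d.set i.toNat (d.getD (i.toNat - 1) 0 + if P i then 1 else 0) := by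
  have ht : (i - 1).toNat = i.toNat - 1 := by omega
  simp only [pvStep, ht]
  cases hP : P i
  · simp
  · simp [List.getD_eq_getElem?_getD, List.set_set, hlen]

/-- invariant of A's dp loop: after processing 2,…,1+j, slot v holds the count of
    `P`-elements in 2..v for v < 2+j, and is still 0 beyond. -/
theorem pvDpInv (P : Int → Bool) {n : Int} (hn : 1 ≤ n) :
    ∀ (j : Nat), (j : Int) ≤ n - 1 →
      (((PySem.List.pyRange 2 (2 + (j : Int))).foldl (pvStep P)
          (List.replicate (n.toNat + 1) (0 : Int))).length = n.toNat + 1) ∧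
      (∀ v : Nat, v ≤ n.toNat →
        ((PySem.List.pyRange 2 (2 + (j : Int))).foldl (pvStep P)
            (List.replicate (n.toNat + 1) (0 : Int))).getD v 0 =
          if (v : Int) < 2 + (j : Int) then (pvCount P (v : Int) : Int) else 0) := by
  intro j
  induction j with
  | zero =>
    intro _
    constructor
    · simp
    · intro v hv
      simp only [Nat.cast_zero, add_zero]
      rw [PySem.List.pyRange_one_eq_nil (by omega : (2:Int) ≤ 2)]
      simp only [List.foldl_nil]
      rw [List.getD_replicate _ (by omega)]
      split_ifs with h
      · rw [pvCount_of_lt_two P (by omega)]; simp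
      · rfl
  | succ j ih =>
    intro hj
    obtain ⟨ihlen, ihget⟩ := ih (by push_cast at hj ⊢; omega)
    have hsplit : PySem.List.pyRange 2 (2 + ((j : Nat) + 1 : Int)) =
        PySem.List.pyRange 2 (2 + (j : Int)) ++ [2 + (j : Int)] := by
      have h : (2 + ((j:Nat) + 1 : Int)) = (2 + (j : Int)) + 1 := by ring
      rw [h, PySem.List.pyRange_one_succ_right (by omega)]
    have hcast : ((j + 1 : Nat) : Int) = (j : Int) + 1 := by push_cast; ring
    rw [hcast]
    rw [hsplit, List.foldl_append, List.foldl_cons, List.foldl_nil]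
    have hjn : (j : Int) + 1 ≤ n - 1 := by push_cast at hj; omega
    have hit : (2 + (j : Int)).toNat = 2 + j := by omega
    have hitN : 2 + j ≤ n.toNat := by omega
    have hlt : (2 + (j : Int)).toNat <
        ((PySem.List.pyRange 2 (2 + (j : Int))).foldl (pvStep P)
          (List.replicate (n.toNat + 1) (0 : Int))).length := by
      rw [ihlen, hit]; omega
    rw [pvStep_eq P _ (by omega) hlt]
    refine ⟨by simp [List.length_set, ihlen], ?_⟩
    intro v hv
    by_cases hve : v = (2 + (j : Int)).toNat
    · subst hve
      rw [List.getD_eq_getElem?_getD, List.getElem?_set_self (by simpa using hlt)]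
      simp only [Option.getD_some]
      have hprev : (2 + (j : Int)).toNat - 1 = 1 + j := by omega
      rw [hprev]
      have h1j : ((1 + j : Nat) : Int) = 1 + (j : Int) := by push_cast; ring
      have := ihget (1 + j) (by omega)
      rw [this, h1j, if_pos (by omega)]
      have hrec := pvCount_succ P (k := 2 + (j : Int)) (by omega)
      have hk1 : (2 + (j : Int)) - 1 = 1 + (j : Int) := by ring
      rw [hk1] at hrec
      have hc2 : (((2 + (j : Int)).toNat : Nat) : Int) = 2 + (j : Int) := by omega
      rw [hc2, if_pos (show (2:Int) + (j:Int) < 2 + ((j:Int) + 1) by omega), hrec]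
      cases hP : P (2 + (j : Int)) <;> simp
    · rw [List.getD_eq_getElem?_getD, List.getElem?_set_ne (fun h => hve h.symm),
        ← List.getD_eq_getElem?_getD, ihget v hv]
      have hneI : (v : Int) ≠ 2 + (j : Int) := by omega
      by_cases hc : (v : Int) < 2 + (j : Int)
      · rw [if_pos hc, if_pos (by omega)]
      · rw [if_neg hc, if_neg (by omega)]

/-- A's dp array holds, at slot val, the number of P-marked values in 2..val. -/
theorem pv_dp_main (P : Int → Bool) {n val : Int} (hn : 1 ≤ n) (h0 : 0 ≤ val) (hv : val ≤ n) :
    ((PySem.List.pyRange 2 (n + 1)).foldl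
        (fun (d : Array Int) i =>
          let d1 := d.setIfInBounds i.toNat (d.getD (i - 1).toNat 0)
          if P i then d1.setIfInBounds i.toNat (d1.getD i.toNat 0 + 1) else d1)
        (Array.replicate (n.toNat + 1) (0 : Int))).getD val.toNat 0 =
      (pvCount P val : Int) := by
  have hcomm : ∀ (x : Array Int) (y : Int),
      pvStep P x.toList y =
        (let d1 := x.setIfInBounds y.toNat (x.getD (y - 1).toNat 0)
         if P y then d1.setIfInBounds y.toNat (d1.getD y.toNat 0 + 1) else d1).toList := by
    intro x y
    simp only [pvStep, pv_arr_getD, Array.toList_setIfInBounds]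
    cases hP : P y <;> simp [Array.toList_setIfInBounds]
  have hhom := List.foldl_hom (l := PySem.List.pyRange 2 (n + 1)) Array.toList
    (g₂ := pvStep P)
    (g₁ := fun (d : Array Int) i =>
      let d1 := d.setIfInBounds i.toNat (d.getD (i - 1).toNat 0)
      if P i then d1.setIfInBounds i.toNat (d1.getD i.toNat 0 + 1) else d1)
    (init := Array.replicate (n.toNat + 1) (0 : Int)) (fun x y => hcomm x y)
  rw [pv_arr_getD, ← hhom, Array.toList_replicate]
  have hrange : PySem.List.pyRange 2 (n + 1) = PySem.List.pyRange 2 (2 + (((n - 1).toNat : Nat) : Int)) := by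
    congr 1; omega
  obtain ⟨hlen, hget⟩ := pvDpInv P hn ((n - 1).toNat) (by omega)
  rw [hrange, hget val.toNat (by omega), if_pos (by omega), Int.toNat_of_nonneg h0]

-- ---------- A's sieve loop: list model ----------

def pvInit (n : Int) : List Bool :=
  ((List.replicate (n.toNat + 1) true).set 0 false).set 1 false

def pvMark (n : Int) (s : List Bool) (i : Int) : List Bool :=
  if s.getD i.toNat false then
    (PySem.List.pyRange (i * i) (n + 1) i).foldl (fun s2 j => s2.set j.toNat false) s
  else s

theorem pv_set_getD (s : List Bool) (a k : Nat) :
    (s.set a false).getD k false = if a = k then false else s.getD k false := by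
  by_cases h : a = k
  · subst h
    rw [if_pos rfl]
    by_cases hl : a < s.length
    · rw [List.getD_eq_getElem?_getD, List.getElem?_set_self (by simpa using hl)]; rfl
    · rw [List.getD_eq_getElem?_getD, List.getElem?_eq_none (by simpa using Nat.le_of_not_lt hl)]; rfl
  · rw [if_neg h, List.getD_eq_getElem?_getD, List.getElem?_set_ne h, ← List.getD_eq_getElem?_getD]

theorem pv_foldl_set_getD (L : List Int) (s : List Bool) (k : Nat) :
    (L.foldl (fun s2 j => s2.set j.toNat false) s).getD k false =
      if ∃ j ∈ L, j.toNat = k then false else s.getD k false := by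
  induction L generalizing s with
  | nil => simp
  | cons j L ih =>
    rw [List.foldl_cons, ih, pv_set_getD]
    by_cases h1 : ∃ x ∈ L, x.toNat = k
    · simp [h1]
    · by_cases h2 : j.toNat = k <;> simp [h1, h2]

theorem pv_foldl_set_len (L : List Int) (s : List Bool) :
    (L.foldl (fun s2 j => s2.set j.toNat false) s).length = s.length := by
  induction L generalizing s with
  | nil => rfl
  | cons j L ih => rw [List.foldl_cons, ih, List.length_set]

/-- membership in the inner marking range, read on Nat indices -/
theorem pv_inner_mem {n i : Int} (hi : 2 ≤ i) (hn : 0 ≤ n) (k : Nat) (hk : k ≤ n.toNat) :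
    (∃ j ∈ PySem.List.pyRange (i * i) (n + 1) i, j.toNat = k) ↔
      (i.toNat * i.toNat ≤ k ∧ i.toNat ∣ k) := by
  have hpos : (0:Int) < i := by omega
  have hii : i ∣ i * i := ⟨i, rfl⟩
  have hcast : ((i.toNat * i.toNat : Nat) : Int) = i * i := by
    push_cast [Int.toNat_of_nonneg (show (0:Int) ≤ i by omega)]; ring
  constructor
  · rintro ⟨j, hj, rfl⟩
    obtain ⟨h1, h2, h3⟩ := (PySem.List.mem_pyRange_iff_of_pos hpos j).mp hj
    have hii0 : 0 ≤ i * i := by positivity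
    have hj0 : 0 ≤ j := le_trans hii0 h1
    have hdj : i ∣ j := by
      have := dvd_add h3 hii
      simpa using this
    constructor
    · have h1' : ((i.toNat * i.toNat : Nat) : Int) ≤ ((j.toNat : Nat) : Int) := by
        rw [hcast, Int.toNat_of_nonneg hj0]; exact h1
      exact_mod_cast h1'
    · have : (i.toNat : Int) ∣ ((j.toNat : Int)) := by
        rwa [Int.toNat_of_nonneg (by omega), Int.toNat_of_nonneg hj0]
      exact_mod_cast this
  · rintro ⟨h1, h2⟩
    refine ⟨(k : Int), ?_, by simp⟩
    rw [PySem.List.mem_pyRange_iff_of_pos hpos]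
    have hsq : i * i ≤ (k : Int) := by
      rw [← hcast]; exact_mod_cast h1
    refine ⟨hsq, by omega, ?_⟩
    have hdk : i ∣ (k : Int) := by
      have : (i.toNat : Int) ∣ ((k : Nat) : Int) := Int.natCast_dvd_natCast.mpr h2
      rwa [Int.toNat_of_nonneg (by omega)] at this
    exact dvd_sub hdk hii

-- ---------- which cells the sieve has cleared ----------

/-- k has a prime factor p ≤ m with p² ≤ k: exactly the cells cleared after steps 2..m -/
def pvMarked (m k : Nat) : Prop := ∃ p : Nat, Nat.Prime p ∧ p ≤ m ∧ p ∣ k ∧ p * p ≤ k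

theorem pvMarked_succ (t k : Nat) :
    pvMarked (t + 1) k ↔ pvMarked t k ∨ (Nat.Prime (t + 1) ∧ (t + 1) ∣ k ∧ (t + 1) * (t + 1) ≤ k) := by
  constructor
  · rintro ⟨p, hp, hle, hdvd, hsq⟩
    rcases Nat.lt_or_ge p (t + 1) with h | h
    · exact Or.inl ⟨p, hp, by omega, hdvd, hsq⟩
    · have : p = t + 1 := by omega
      subst this; exact Or.inr ⟨hp, hdvd, hsq⟩
  · rintro (⟨p, hp, hle, hdvd, hsq⟩ | ⟨hp, hdvd, hsq⟩)
    · exact ⟨p, hp, by omega, hdvd, hsq⟩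
    · exact ⟨t + 1, hp, le_refl _, hdvd, hsq⟩

theorem pv_prime_of_not_marked {k : Nat} (h2 : 2 ≤ k) (h : ¬ pvMarked (k - 1) k) : Nat.Prime k := by
  by_contra hnp
  have hpf : Nat.Prime k.minFac := Nat.minFac_prime (by omega)
  have hdvd : k.minFac ∣ k := Nat.minFac_dvd k
  have hsq : k.minFac * k.minFac ≤ k := by
    have := Nat.minFac_sq_le_self (by omega) hnp
    nlinarith [this]
  have hlt : k.minFac < k := by
    rcases Nat.lt_or_ge k.minFac k with h' | h'
    · exact h'
    · have : k.minFac = k := le_antisymm (Nat.le_of_dvd (by omega) hdvd) h'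
      exact absurd (this ▸ hpf) hnp
  exact h ⟨k.minFac, hpf, by omega, hdvd, hsq⟩

theorem pv_not_marked_of_prime {k m : Nat} (hp : Nat.Prime k) (hm : m < k) : ¬ pvMarked m k := by
  rintro ⟨p, hpp, hle, hdvd, hsq⟩
  rcases (Nat.Prime.eq_one_or_self_of_dvd hp p hdvd) with h | h
  · exact absurd h (Nat.Prime.one_lt hpp).ne'
  · omega

theorem pvMarked_final {k n : Nat} (h2 : 2 ≤ k) (hkn : k ≤ n) :
    (¬ pvMarked n k) ↔ Nat.Prime k := by
  constructor
  · intro h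
    refine pv_prime_of_not_marked h2 (fun ⟨p, hp, hle, hdvd, hsq⟩ => h ⟨p, hp, by omega, hdvd, hsq⟩)
  · intro hp ⟨p, hpp, hle, hdvd, hsq⟩
    rcases (Nat.Prime.eq_one_or_self_of_dvd hp p hdvd) with h | h
    · exact absurd h (Nat.Prime.one_lt hpp).ne'
    · subst h; nlinarith

-- ---------- sieve invariant ----------

theorem pvInit_getD {n : Int} (k : Nat) :
    (pvInit n).getD k false = true ↔ (2 ≤ k ∧ k ≤ n.toNat) := by
  unfold pvInit
  rw [pv_set_getD, pv_set_getD]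
  by_cases h1 : 1 = k
  · simp [h1.symm ▸ (by omega : ¬ (2 ≤ (1:Nat)))]; omega
  · by_cases h0 : 0 = k
    · simp [h0.symm ▸ (by omega : ¬ (2 ≤ (0:Nat)))]; omega
    · rw [if_neg h1, if_neg h0]
      by_cases hl : k < n.toNat + 1
      · rw [List.getD_replicate _ (by simpa using hl)]
        simp; omega
      · rw [List.getD_eq_getElem?_getD, List.getElem?_eq_none (by simpa using Nat.le_of_not_lt hl)]
        simp; omega

theorem pvSieveInv {n : Int} (hn : 1 ≤ n) :
    ∀ (t : Nat), (t : Int) ≤ n - 1 →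
      (((PySem.List.pyRange 2 (2 + (t : Int))).foldl (pvMark n) (pvInit n)).length = n.toNat + 1) ∧
      (∀ k : Nat, k ≤ n.toNat →
        (((PySem.List.pyRange 2 (2 + (t : Int))).foldl (pvMark n) (pvInit n)).getD k false = true ↔
          (2 ≤ k ∧ ¬ pvMarked (1 + t) k))) := by
  intro t
  induction t with
  | zero =>
    intro _
    rw [PySem.List.pyRange_one_eq_nil (by omega : (2:Int) + (0:Nat) ≤ 2)]
    simp only [List.foldl_nil]
    constructor
    · simp [pvInit]
    · intro k hk
      rw [pvInit_getD]
      constructor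
      · rintro ⟨h2, _⟩
        exact ⟨h2, fun ⟨p, hp, hle, _, _⟩ => by have := hp.two_le; omega⟩
      · rintro ⟨h2, _⟩; exact ⟨h2, hk⟩
  | succ t ih =>
    intro ht
    obtain ⟨ihlen, ihget⟩ := ih (by push_cast at ht ⊢; omega)
    have hsplit : PySem.List.pyRange 2 (2 + ((t : Nat) + 1 : Int)) =
        PySem.List.pyRange 2 (2 + (t : Int)) ++ [2 + (t : Int)] := by
      have h : (2 + ((t:Nat) + 1 : Int)) = (2 + (t : Int)) + 1 := by ring
      rw [h, PySem.List.pyRange_one_succ_right (by omega)]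
    have hcast : ((t + 1 : Nat) : Int) = (t : Int) + 1 := by push_cast; ring
    rw [hcast, hsplit, List.foldl_append, List.foldl_cons, List.foldl_nil]
    set S := (PySem.List.pyRange 2 (2 + (t : Int))).foldl (pvMark n) (pvInit n) with hS
    have hiN : (2 + (t : Int)).toNat = 2 + t := by omega
    have hitN : 2 + t ≤ n.toNat := by push_cast at ht; omega
    have hshift : ∀ k, pvMarked (1 + (t + 1)) k ↔ pvMarked ((1 + t) + 1) k := by
      intro k; have : 1 + (t + 1) = (1 + t) + 1 := by omega
      rw [this]
    unfold pvMark
    by_cases hc : S.getD (2 + (t : Int)).toNat false = true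
    · rw [if_pos hc]
      have hcond := (ihget (2 + t) hitN)
      rw [hiN] at hc
      obtain ⟨-, hnm⟩ := hcond.mp hc
      have hprime : Nat.Prime (2 + t) := by
        apply pv_prime_of_not_marked (by omega)
        have : 2 + t - 1 = 1 + t := by omega
        rwa [this]
      refine ⟨by rw [pv_foldl_set_len]; exact ihlen, ?_⟩
      intro k hk
      rw [pv_foldl_set_getD]
      have hi2 : (2:Int) ≤ 2 + (t : Int) := by omega
      have hmem := pv_inner_mem hi2 (by omega) k hk
      rw [hiN] at hmem
      by_cases hm : ∃ j ∈ PySem.List.pyRange ((2 + (t:Int)) * (2 + (t:Int))) (n + 1) (2 + (t:Int)), j.toNat = k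
      · rw [if_pos hm]
        obtain ⟨hsq, hdvd⟩ := hmem.mp hm
        have hmk : pvMarked (1 + (t + 1)) k := by
          rw [hshift, pvMarked_succ]
          right
          have : 1 + t + 1 = 2 + t := by omega
          rw [this]
          exact ⟨hprime, hdvd, hsq⟩
        constructor
        · intro h; exact absurd h (by simp)
        · rintro ⟨-, h⟩; exact absurd hmk h
      · rw [if_neg hm, ihget k hk]
        have hnot : ¬ ((2 + t) ∣ k ∧ (2 + t) * (2 + t) ≤ k) := by
          intro ⟨hd, hs⟩; exact hm (hmem.mpr ⟨hs, hd⟩)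
        constructor
        · rintro ⟨h2, hnm'⟩
          refine ⟨h2, ?_⟩
          rw [hshift, pvMarked_succ]
          rintro (h | ⟨hp', hd', hs'⟩)
          · exact hnm' h
          · have : 1 + t + 1 = 2 + t := by omega
            rw [this] at hd' hs'
            exact hnot ⟨hd', hs'⟩
        · rintro ⟨h2, hnm'⟩
          refine ⟨h2, fun h => hnm' ?_⟩
          rw [hshift, pvMarked_succ]
          exact Or.inl h
    · rw [if_neg hc]
      have hnp : ¬ Nat.Prime (2 + t) := by
        intro hp
        apply hc
        rw [hiN, ihget (2 + t) hitN]
        exact ⟨by omega, pv_not_marked_of_prime hp (by omega)⟩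
      refine ⟨ihlen, ?_⟩
      intro k hk
      rw [ihget k hk]
      have : ∀ h2 : 2 ≤ k, (¬ pvMarked (1 + t) k ↔ ¬ pvMarked (1 + (t + 1)) k) := by
        intro _
        rw [hshift, pvMarked_succ]
        constructor
        · intro h
          rintro (h' | ⟨hp', _, _⟩)
          · exact h h'
          · have : 1 + t + 1 = 2 + t := by omega
            rw [this] at hp'
            exact hnp hp'
        · intro h h'
          exact h (Or.inl h')
      constructor
      · rintro ⟨h2, hh⟩; exact ⟨h2, (this h2).mp hh⟩
      · rintro ⟨h2, hh⟩; exact ⟨h2, (this h2).mpr hh⟩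

/-- the sieve's final cell k (2 ≤ k ≤ n) says exactly "k is prime" -/
theorem pv_sieve_getD {n : Int} (hn : 1 ≤ n) (k : Nat) (h2 : 2 ≤ k) (hk : k ≤ n.toNat) :
    ((PySem.List.pyRange 2 (n + 1)).foldl (pvMark n) (pvInit n)).getD k false = true ↔
      Nat.Prime k := by
  have hrange : PySem.List.pyRange 2 (n + 1) = PySem.List.pyRange 2 (2 + (((n - 1).toNat : Nat) : Int)) := by
    congr 1; omega
  obtain ⟨-, hget⟩ := pvSieveInv hn ((n - 1).toNat) (by omega)
  rw [hrange, hget k hk]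
  have h1n : 1 + (n - 1).toNat = n.toNat := by omega
  rw [h1n]
  constructor
  · rintro ⟨-, h⟩; exact (pvMarked_final h2 hk).mp h
  · intro hp; exact ⟨h2, (pvMarked_final h2 hk).mpr hp⟩

theorem pv_foldl_set_toList (L : List Int) (x : Array Bool) :
    (L.foldl (fun pr2 j => pr2.setIfInBounds j.toNat false) x).toList =
      L.foldl (fun s2 j => s2.set j.toNat false) x.toList := by
  induction L generalizing x with
  | nil => rfl
  | cons j L ih => rw [List.foldl_cons, List.foldl_cons, ih, Array.toList_setIfInBounds]

/-- bridge: A's Array sieve equals the list model -/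
theorem pv_sieve_arr {n : Int} :
    ((PySem.List.pyRange 2 (n + 1)).foldl
        (fun (pr : Array Bool) i =>
          if pr.getD i.toNat false then
            (PySem.List.pyRange (i * i) (n + 1) i).foldl
              (fun pr2 j => pr2.setIfInBounds j.toNat false) pr
          else pr)
        (((Array.replicate (n.toNat + 1) true).setIfInBounds 0 false).setIfInBounds 1 false)).toList =
      (PySem.List.pyRange 2 (n + 1)).foldl (pvMark n) (pvInit n) := by
  have hcomm : ∀ (x : Array Bool) (y : Int),
      pvMark n x.toList y =
        (if x.getD y.toNat false then
          (PySem.List.pyRange (y * y) (n + 1) y).foldl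
            (fun pr2 j => pr2.setIfInBounds j.toNat false) x
         else x).toList := by
    intro x y
    simp only [pvMark, pv_arr_getD]
    split
    · exact (pv_foldl_set_toList _ _).symm
    · rfl
  have hhom := List.foldl_hom (l := PySem.List.pyRange 2 (n + 1)) Array.toList
    (g₂ := pvMark n)
    (g₁ := fun (pr : Array Bool) i =>
      if pr.getD i.toNat false then
        (PySem.List.pyRange (i * i) (n + 1) i).foldl
          (fun pr2 j => pr2.setIfInBounds j.toNat false) pr
      else pr)
    (init := ((Array.replicate (n.toNat + 1) true).setIfInBounds 0 false).setIfInBounds 1 false)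
    (fun x y => hcomm x y)
  rw [← hhom]
  congr 1
  simp [pvInit, Array.toList_setIfInBounds]

-- ---------- B's side ----------

theorem pv_trial_iff {k : Int} (h2 : 2 ≤ k) : pvIsPrime k = true ↔ Nat.Prime k.toNat := by
  have hsq : Int.sqrt k = ((Nat.sqrt k.toNat : Nat) : Int) := rfl
  simp only [pvIsPrime, List.all_eq_true, decide_eq_true_eq]
  constructor
  · intro h
    rw [Nat.prime_def_le_sqrt]
    refine ⟨by omega, fun m hm2 hms hdvd => ?_⟩
    have hmem : (m : Int) ∈ PySem.List.pyRange 2 (Int.sqrt k + 1) :=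
      PySem.List.mem_pyRange_one.mpr ⟨by exact_mod_cast hm2, by rw [hsq]; exact_mod_cast Nat.lt_succ_of_le hms⟩
    apply h _ hmem
    rw [PySem.Int.mod_eq_zero_iff_dvd]
    have : ((m : Nat) : Int) ∣ ((k.toNat : Nat) : Int) := Int.natCast_dvd_natCast.mpr hdvd
    rwa [Int.toNat_of_nonneg (by omega)] at this
  · intro hp d hd hmod
    obtain ⟨hd2, hdlt⟩ := PySem.List.mem_pyRange_one.mp hd
    have hdvd : d ∣ k := (PySem.Int.mod_eq_zero_iff_dvd k d).mp hmod
    have hdvdN : d.toNat ∣ k.toNat := by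
      have : ((d.toNat : Nat) : Int) ∣ ((k.toNat : Nat) : Int) := by
        rwa [Int.toNat_of_nonneg (by omega), Int.toNat_of_nonneg (by omega)]
      exact_mod_cast this
    have := (Nat.prime_def_le_sqrt.mp hp).2 d.toNat (by omega) (by rw [hsq] at hdlt; omega) hdvdN
    exact this

theorem pv_countUpto_eq (v : Int) : pvCountPrimesUpto v = (pvCount pvIsPrime v : Int) := by
  simp [pvCountPrimesUpto, pvCount, PySem.List.foldl_count_if, List.countP_eq_length_filter]

-- ===== VERDICT (by name: the statement is the Claim_ definition above) =====
theorem threeDivisors_spec : Claim_equal_threeDivisors := by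
  intro query q _ hpre
  obtain ⟨hne, hpos, x, hx, hx1⟩ := hpre
  unfold Spec_threeDivisors threeDivisors threeDivisors_alt
  cases hmax : PySem.List.max? query (fun x => x) with
  | none => exact absurd ((PySem.List.max?_eq_none_iff query (fun x => x)).mp hmax) hne
  | some mx =>
    have hmx1 : 1 ≤ mx := le_trans hx1 (PySem.List.max?_isMax hmax x hx)
    have hn1 : 1 ≤ Int.sqrt mx := by
      have := pv_sqrt_mono hmx1
      simpa using this
    simp only [PySem.List.foldl_append_singleton_eq_map, List.nil_append]
    apply List.map_congr_left
    intro i hi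
    have hi0 : 0 ≤ i := hpos i hi
    have hile : i ≤ mx := PySem.List.max?_isMax hmax i hi
    have hv0 : 0 ≤ Int.sqrt i := Int.sqrt_nonneg i
    have hvle : Int.sqrt i ≤ Int.sqrt mx := pv_sqrt_mono hile
    rw [pv_dp_main _ hn1 hv0 hvle, pv_countUpto_eq]
    congr 1
    unfold pvCount
    congr 1
    apply List.filter_congr
    intro k hk
    obtain ⟨hk2, hklt⟩ := PySem.List.mem_pyRange_one.mp hk
    have hkle : k ≤ Int.sqrt mx := by omega
    have hsieve := pv_sieve_getD hn1 k.toNat (by omega) (by omega)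
    rw [pv_arr_getD, pv_sieve_arr] at *
    have htrial := pv_trial_iff hk2
    cases hA : ((PySem.List.pyRange 2 (Int.sqrt mx + 1)).foldl (pvMark (Int.sqrt mx)) (pvInit (Int.sqrt mx))).getD k.toNat false <;>
      cases hB : pvIsPrime k <;> simp_all
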